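-- pv_equiv track=rewrite | github.com/frankyaoxiao/IFEval-Jailbreak | scripts/activation/build_toxicity_batches.py | chunk_requests
-- ===== SOURCE A (Python) =====
-- from typing import Iterable, List, Sequence
--
-- def chunk_requests(pairs: Iterable[tuple[dict, dict]], chunk_size: int) -> List[List[dict]]:
--     chunks: List[List[dict]] = []
--     buffer: List[dict] = []
--     for win_request, lose_request in pairs:
--         buffer.append(win_request)
--         buffer.append(lose_request)
--         if len(buffer) >= chunk_size * 2:
--             chunks.append(buffer)
--             buffer = []
--     if buffer:
--         chunks.append(buffer)
--     return chunks
-- ===== SOURCE B (Python) =====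
-- def chunk_requests(pairs, chunk_size):
--     flat = [request for pair in pairs for request in pair]
--     step = 2 * max(chunk_size, 1)
--     chunks = []
--     while flat:
--         chunks.append(flat[:step])
--         flat = flat[step:]
--     return chunks
-- ===== Notes on version B (the rewrite author's own statement) =====
-- stated objective: simpler
-- what changed: Replaces A's running buffer with threshold-flush inside the pair loop by materialize-then-slice: flatten all pairs into one flat list, then repeatedly cut off fixed-width slices of 2*max(chunk_size,1) elements (which reproduces A's one-pair-per-chunk behaviour for chunk_size <= 0).
import Mathlib
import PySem

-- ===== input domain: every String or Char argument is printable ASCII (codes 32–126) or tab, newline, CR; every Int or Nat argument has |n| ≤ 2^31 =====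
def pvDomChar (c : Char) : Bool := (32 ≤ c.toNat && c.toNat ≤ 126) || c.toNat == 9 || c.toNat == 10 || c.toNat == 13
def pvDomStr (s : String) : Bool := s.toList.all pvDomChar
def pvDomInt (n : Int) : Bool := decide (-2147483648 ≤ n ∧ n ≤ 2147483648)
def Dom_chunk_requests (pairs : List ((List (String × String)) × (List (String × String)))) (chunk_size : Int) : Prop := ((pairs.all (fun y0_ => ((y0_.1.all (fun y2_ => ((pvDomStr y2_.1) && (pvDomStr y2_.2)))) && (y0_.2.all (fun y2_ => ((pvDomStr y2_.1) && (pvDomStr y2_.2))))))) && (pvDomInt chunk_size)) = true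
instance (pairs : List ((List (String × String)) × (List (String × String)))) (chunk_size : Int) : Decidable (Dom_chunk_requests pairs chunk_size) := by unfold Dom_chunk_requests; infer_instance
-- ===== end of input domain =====

-- B replaces A's running buffer with threshold-flush by flatten-then-slice: materialize the
-- flat request list once, then repeatedly cut off a slice of fixed width 2*max(chunk_size,1)
-- (objective: simpler decomposition; same O(n) cost).

-- ===== PORT A =====
-- A's loop state: (chunks so far, current buffer); flush when len(buffer) >= chunk_size*2.
def chunk_requests (pairs : List ((List (String × String)) × (List (String × String)))) (chunk_size : Int) : List (List (List (String × String))) :=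
  let st := pairs.foldl
    (fun (st : List (List (List (String × String))) × List (List (String × String))) p =>
      let buffer := st.2 ++ [p.1] ++ [p.2]
      if chunk_size * 2 ≤ (buffer.length : Int) then (st.1 ++ [buffer], [])
      else (st.1, buffer))
    ([], [])
  if st.2 = [] then st.1 else st.1 ++ [st.2]

-- ===== PORT B =====
-- 'while flat: chunks.append(flat[:step]); flat = flat[step:]' — the 0 < step argument only
-- justifies termination (B always calls it with step = 2*max(chunk_size,1) ≥ 2).
def pvAltLoop (step : Int) (hstep : 0 < step) : List (List (String × String)) → List (List (List (String × String)))
  | [] => []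
  | x :: xs =>
      PySem.List.slice (x :: xs) none (some step) ::
        pvAltLoop step hstep (PySem.List.slice (x :: xs) (some step) none)
  termination_by l => l.length
  decreasing_by
    rw [PySem.List.slice_from _ (le_of_lt hstep)]
    simp
    omega

def chunk_requests_alt (pairs : List ((List (String × String)) × (List (String × String)))) (chunk_size : Int) : List (List (List (String × String))) :=
  let flat := pairs.flatMap (fun p => [p.1, p.2])
  pvAltLoop (2 * max chunk_size 1) (by positivity) flat

-- ===== PRECONDITION & SPEC =====
def Spec_chunk_requests (pairs : List ((List (String × String)) × (List (String × String)))) (chunk_size : Int) (out : List (List (List (String × String)))) : Prop := out = chunk_requests_alt pairs chunk_size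
instance (pairs : List ((List (String × String)) × (List (String × String)))) (chunk_size : Int) (out : List (List (List (String × String)))) : Decidable (Spec_chunk_requests pairs chunk_size out) := by unfold Spec_chunk_requests; infer_instance

-- ===== CLAIM (what is proved, stated in full; the proofs are below) =====
def Claim_equal_chunk_requests : Prop := ∀ (pairs : List ((List (String × String)) × (List (String × String)))) (chunk_size : Int), Dom_chunk_requests pairs chunk_size → Spec_chunk_requests pairs chunk_size (chunk_requests pairs chunk_size)

-- ===== LEMMAS AND PROOFS =====

-- unfolding pvAltLoop on a nonempty list
theorem pvAltLoop_ne_nil (step : Int) (h : 0 < step) (l : List (List (String × String))) (hl : l ≠ []) :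
    pvAltLoop step h l =
      PySem.List.slice l none (some step) :: pvAltLoop step h (PySem.List.slice l (some step) none) := by
  cases l with
  | nil => exact absurd rfl hl
  | cons x xs => rw [pvAltLoop]

-- A's flush test 'chunk_size*2 ≤ newlen' equals 'step ≤ newlen' for step = 2*max(chunk_size,1),
-- because newlen ≥ 2 always.
theorem pvFlushIff (cs newlen : Int) (h2 : 2 ≤ newlen) :
    (cs * 2 ≤ newlen) ↔ (2 * max cs 1 ≤ newlen) := by
  by_cases h : cs ≤ 0
  · have hm : max cs 1 = 1 := max_eq_right (by omega)
    rw [hm]; omega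
  · have hm : max cs 1 = cs := max_eq_left (by omega)
    rw [hm]; omega

-- main invariant: finishing A's fold from state (chunks, buf) appends exactly the
-- fixed-width slices of buf ++ flat(pairs), provided buf is even and shorter than step.
theorem pvInvariant (cs : Int)
    (pairs : List ((List (String × String)) × (List (String × String))))
    (hstep : (0:Int) < 2 * max cs 1) :
    ∀ (chunks : List (List (List (String × String)))) (buf : List (List (String × String))),
      buf.length % 2 = 0 → (buf.length : Int) + 2 ≤ 2 * max cs 1 →
      (let st := pairs.foldl
          (fun (st : List (List (List (String × String))) × List (List (String × String))) p =>
            let buffer := st.2 ++ [p.1] ++ [p.2]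
            if cs * 2 ≤ (buffer.length : Int) then (st.1 ++ [buffer], [])
            else (st.1, buffer)) (chunks, buf)
       if st.2 = [] then st.1 else st.1 ++ [st.2])
      = chunks ++ pvAltLoop (2 * max cs 1) hstep (buf ++ pairs.flatMap (fun p => [p.1, p.2])) := by
  induction pairs with
  | nil =>
    intro chunks buf hev hlt
    simp only [List.foldl_nil, List.flatMap_nil, List.append_nil]
    by_cases hb : buf = []
    · simp [hb, pvAltLoop]
    · rw [pvAltLoop_ne_nil _ _ _ hb]
      have hlen : (buf.length : Int) ≤ 2 * max cs 1 := by omega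
      have htake : PySem.List.slice buf none (some (2 * max cs 1)) = buf := by
        rw [PySem.List.slice_to _ (le_of_lt hstep)]
        exact List.take_of_length_le (by omega)
      have hdrop : PySem.List.slice buf (some (2 * max cs 1)) none = [] := by
        rw [PySem.List.slice_from _ (le_of_lt hstep)]
        exact List.drop_eq_nil_of_le (by omega)
      simp [hb, htake, hdrop, pvAltLoop]
  | cons p rest ih =>
    intro chunks buf hev hlt
    simp only [List.foldl_cons, List.flatMap_cons]
    set newbuf := buf ++ [p.1] ++ [p.2] with hnb
    have hnblen : newbuf.length = buf.length + 2 := by simp [hnb]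
    have h2 : (2:Int) ≤ (newbuf.length : Int) := by
      rw [hnblen]; push_cast; omega
    by_cases hfl : cs * 2 ≤ (newbuf.length : Int)
    · -- flush: buffer reaches exactly step
      have hstep_le : 2 * max cs 1 ≤ (newbuf.length : Int) := (pvFlushIff cs _ h2).1 hfl
      have hexact : (newbuf.length : Int) = 2 * max cs 1 := by
        rw [hnblen]; rw [hnblen] at hstep_le; push_cast at *; omega
      rw [if_pos hfl]
      rw [ih (chunks ++ [newbuf]) [] (by simp) (by simp)]
      have hassoc : buf ++ ([p.1, p.2] ++ rest.flatMap (fun p => [p.1, p.2]))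
          = newbuf ++ rest.flatMap (fun p => [p.1, p.2]) := by
        simp [hnb]
      rw [hassoc]
      have hne : newbuf ++ rest.flatMap (fun p => [p.1, p.2]) ≠ [] := by
        intro h; have := congrArg List.length h
        simp [hnblen] at this
      rw [pvAltLoop_ne_nil _ _ _ hne]
      have hnat : (2 * max cs 1).toNat = newbuf.length := by omega
      have htake : PySem.List.slice (newbuf ++ rest.flatMap (fun p => [p.1, p.2])) none (some (2 * max cs 1)) = newbuf := by
        rw [PySem.List.slice_to _ (le_of_lt hstep), hnat]
        simp
      have hdrop : PySem.List.slice (newbuf ++ rest.flatMap (fun p => [p.1, p.2])) (some (2 * max cs 1)) none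
          = rest.flatMap (fun p => [p.1, p.2]) := by
        rw [PySem.List.slice_from _ (le_of_lt hstep), hnat]
        simp
      rw [htake, hdrop]
      simp
    · -- no flush: buffer stays under step
      have hlt' : ¬ (2 * max cs 1 ≤ (newbuf.length : Int)) := fun h => hfl ((pvFlushIff cs _ h2).2 h)
      have hev' : newbuf.length % 2 = 0 := by omega
      have hle' : (newbuf.length : Int) + 2 ≤ 2 * max cs 1 := by
        push_cast at hlt' ⊢
        have : (newbuf.length : Int) % 2 = 0 := by exact_mod_cast hev'
        have hst2 : (2 * max cs 1) % 2 = 0 := by omega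
        omega
      rw [if_neg hfl]
      rw [ih chunks newbuf hev' hle']
      simp [hnb]

-- ===== VERDICT (by name: the statement is the Claim_ definition above) =====
theorem chunk_requests_spec : Claim_equal_chunk_requests := by
  intro pairs cs _
  show chunk_requests pairs cs = chunk_requests_alt pairs cs
  unfold chunk_requests chunk_requests_alt
  have hstep : (0:Int) < 2 * max cs 1 := by positivity
  have := pvInvariant cs pairs hstep [] [] (by simp) (by simp)
  simpa using this
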